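-- pv_equiv track=rewrite | github.com/Kailexi/RUDN_sem1 | lab5/lab5dop.py | find_row_and_col
-- ===== SOURCE A (Python) =====
-- def find_row_and_col(matrix):
--     max_count_zeros, max_sum = 0, 0
--     row, col = 0, 0
--     for i in range(len(matrix)):
--         if matrix[i].count(0) > max_count_zeros:
--             row = i
--             max_count_zeros = matrix[i].count(0)
--     for x in range(len(matrix)):
--         current_sum = 0
--         for y in range(len(matrix)):
--             current_sum += matrix[y][x]
--         if current_sum > max_sum:
--             col = x
--             max_sum = current_sum
--     return row, col, max_sum
-- ===== SOURCE B (Python) =====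
-- def find_row_and_col(matrix):
--     n = len(matrix)
--     col_sums = [0] * n
--     best_zeros, row = 0, 0
--     for i, r in enumerate(matrix):
--         z = r.count(0)
--         if z > best_zeros:
--             best_zeros, row = z, i
--         col_sums = [col_sums[j] + r[j] for j in range(n)]
--     max_sum, col = 0, 0
--     for j, s in enumerate(col_sums):
--         if s > max_sum:
--             max_sum, col = s, j
--     return row, col, max_sum
-- ===== Notes on version B (the rewrite author's own statement) =====
-- stated objective: alternative
-- what changed: A makes a column-major pass with an inner loop per column plus a separate zero-count pass; B makes a single row-major pass that accumulates all column sums at once (zip/comprehension) while tracking the best zero-count row, then one selection scan over col_sums.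
import Mathlib
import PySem

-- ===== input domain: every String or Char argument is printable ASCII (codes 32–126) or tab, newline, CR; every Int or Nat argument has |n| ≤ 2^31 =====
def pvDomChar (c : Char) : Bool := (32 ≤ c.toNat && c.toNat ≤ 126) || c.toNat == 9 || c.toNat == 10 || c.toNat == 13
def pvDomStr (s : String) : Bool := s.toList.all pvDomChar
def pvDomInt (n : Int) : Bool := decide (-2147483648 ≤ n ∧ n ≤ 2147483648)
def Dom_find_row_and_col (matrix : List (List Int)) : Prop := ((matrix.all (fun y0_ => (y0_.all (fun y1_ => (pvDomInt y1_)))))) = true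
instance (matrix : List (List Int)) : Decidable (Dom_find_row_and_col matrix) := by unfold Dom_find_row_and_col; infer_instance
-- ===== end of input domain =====

-- B replaces A's column-major double loop (plus a separate zero-count pass) by one row-major
-- pass accumulating all column sums at once, then a selection scan; alternative decomposition, same O(n^2).


-- ===== PORT A =====
def find_row_and_col (matrix : List (List Int)) : Int × Int × Int :=
  let n : Int := (matrix.length : Int)
  -- first loop: best zero-count row; state = (max_count_zeros, row)
  let rs := (PySem.List.pyRange 0 n 1).foldl
    (fun (st : Int × Int) i =>
      if (PySem.List.count (PySem.List.pyGetD matrix i []) (0 : Int) : Int) > st.1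
      then ((PySem.List.count (PySem.List.pyGetD matrix i []) (0 : Int) : Int), i)
      else st) (0, 0)
  -- second loop: best column sum; state = (max_sum, col)
  let cs := (PySem.List.pyRange 0 n 1).foldl
    (fun (st : Int × Int) x =>
      let current_sum := (PySem.List.pyRange 0 n 1).foldl
        (fun acc y => acc + PySem.List.pyGetD (PySem.List.pyGetD matrix y []) x 0) 0
      if current_sum > st.1 then (current_sum, x) else st) (0, 0)
  (rs.2, cs.2, cs.1)

-- ===== PORT B =====
def find_row_and_col_alt (matrix : List (List Int)) : Int × Int × Int :=
  let n := matrix.length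
  -- single row-major pass; state = ((best_zeros, row), col_sums)
  let st := (PySem.List.enumerate matrix).foldl
    (fun (st : (Int × Int) × List Int) p =>
      let z : Int := (PySem.List.count p.2 (0 : Int) : Int)
      ((if z > st.1.1 then (z, p.1) else st.1),
        (PySem.List.pyRange 0 ((matrix.length : Int)) 1).map
          (fun j => PySem.List.pyGetD st.2 j 0 + PySem.List.pyGetD p.2 j 0)))
    ((0, 0), List.replicate n 0)
  -- selection scan over col_sums; state = (max_sum, col)
  let sel := (PySem.List.enumerate st.2).foldl
    (fun (acc : Int × Int) p => if p.2 > acc.1 then (p.2, p.1) else acc) (0, 0)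
  (st.1.2, sel.2, sel.1)

-- ===== PRECONDITION & SPEC =====
-- Pre_ excludes exactly the inputs where Python A raises IndexError: some row shorter than the
-- number of rows (A reads matrix[y][x] for all x,y < len(matrix)).
def Pre_find_row_and_col (matrix : List (List Int)) : Prop :=
  ∀ r ∈ matrix, matrix.length ≤ r.length
instance (matrix : List (List Int)) : Decidable (Pre_find_row_and_col matrix) := by
  unfold Pre_find_row_and_col; infer_instance
def pvWitness_find_row_and_col : List (List Int) := [[0, 1], [2, 3]]

def Spec_find_row_and_col (matrix : List (List Int)) (out : Int × Int × Int) : Prop := out = find_row_and_col_alt matrix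
instance (matrix : List (List Int)) (out : Int × Int × Int) : Decidable (Spec_find_row_and_col matrix out) := by unfold Spec_find_row_and_col; infer_instance

-- ===== CLAIM (what is proved, stated in full; the proofs are below) =====
def Claim_equal_find_row_and_col : Prop := ∀ (matrix : List (List Int)), Dom_find_row_and_col matrix → Pre_find_row_and_col matrix → Spec_find_row_and_col matrix (find_row_and_col matrix)

-- ===== LEMMAS AND PROOFS =====

-- proof-only helpers: the two selection bodies, and a canonical form shared by both ports
def pvRowStep : (Int × Int) → (Int × List Int) → (Int × Int) := fun a p =>
  if ((PySem.List.count p.2 (0 : Int)) : Int) > a.1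
  then (((PySem.List.count p.2 (0 : Int)) : Int), p.1) else a

def pvSelStep : (Int × Int) → (Int × Int) → (Int × Int) := fun a p =>
  if p.2 > a.1 then (p.2, p.1) else a

def pvCanon (matrix : List (List Int)) : Int × Int × Int :=
  let row := ((PySem.List.enumerate matrix).foldl pvRowStep (0, 0)).2
  let cs := (List.range matrix.length).map (fun j => ((matrix.map (fun r => r[j]!)).sum))
  let sel := (PySem.List.enumerate cs).foldl pvSelStep (0, 0)
  (row, sel.2, sel.1)

-- a fold whose state components evolve independently splits into two folds
theorem pv_foldl_prod_split {α β γ : Type} (l : List α) (f : β → α → β) (g : γ → α → γ)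
    (b : β) (c : γ) :
    l.foldl (fun st x => (f st.1 x, g st.2 x)) (b, c) = (l.foldl f b, l.foldl g c) := by
  induction l generalizing b c with
  | nil => rfl
  | cons x xs ih => simp [List.foldl_cons, ih]

-- folding over enumerate with a body that ignores the index is folding over the list
theorem pv_foldl_enumerate_snd {γ : Type} (xs : List (List Int)) (s : Int)
    (g : γ → List Int → γ) (c : γ) :
    (PySem.List.enumerate xs s).foldl (fun c p => g c p.2) c = xs.foldl g c := by
  induction xs generalizing s c with
  | nil => simp [PySem.List.enumerate_nil]
  | cons x xs ih => simp [PySem.List.enumerate_cons, ih]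

-- repeated index-wise accumulation of rows into col_sums, characterised elementwise
theorem pv_zip_fold (n : Nat) (rows : List (List Int)) (cs0 : List Int) (hcs0 : cs0.length = n)
    (h : ∀ r ∈ rows, n ≤ r.length) :
    rows.foldl (fun c r => (PySem.List.pyRange 0 (n : Int) 1).map
        (fun j => PySem.List.pyGetD c j 0 + PySem.List.pyGetD r j 0)) cs0
      = (List.range n).map (fun j => cs0[j]! + ((rows.map (fun r => r[j]!)).sum)) := by
  induction rows generalizing cs0 with
  | nil =>
    apply List.ext_getElem
    · simp [hcs0]
    · intro j hj hj2
      simp only [List.foldl_nil] at hj ⊢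
      simp only [List.getElem_map, List.getElem_range, List.map_nil, List.sum_nil, add_zero]
      rw [getElem!_pos cs0 j hj]
  | cons r rows ih =>
    have hr : n ≤ r.length := h r (List.mem_cons_self)
    set c' := (PySem.List.pyRange 0 (n : Int) 1).map
        (fun j => PySem.List.pyGetD cs0 j 0 + PySem.List.pyGetD r j 0) with hc'
    have hlen : c'.length = n := by simp [hc', PySem.List.length_pyRange_one]
    rw [List.foldl_cons, ih c' hlen (fun r' hr' => h r' (List.mem_cons_of_mem _ hr'))]
    apply List.map_congr_left
    intro j hj
    rw [List.mem_range] at hj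
    have hjc : j < cs0.length := by omega
    have hjr : j < r.length := by omega
    have h1 : c'[j]! = cs0[j]! + r[j]! := by
      rw [getElem!_pos c' j (by omega), getElem!_pos cs0 j hjc, getElem!_pos r j hjr]
      simp [hc', PySem.List.getElem_pyRange_one, List.getD_eq_getElem?_getD, hjc, hjr]
    rw [h1]
    simp [add_assoc]

-- the column-sum A computes for column x equals element x of the canonical col_sums list
theorem pv_colsum (matrix : List (List Int)) (hpre : Pre_find_row_and_col matrix)
    (x : Int) (hx0 : 0 ≤ x) (hx1 : x < (matrix.length : Int)) :
    (PySem.List.pyRange 0 ((matrix.length : Int)) 1).foldl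
        (fun acc y => acc + PySem.List.pyGetD (PySem.List.pyGetD matrix y []) x 0) 0
      = PySem.List.pyGetD
          ((List.range matrix.length).map (fun j => ((matrix.map (fun r => r[j]!)).sum))) x 0 := by
  have hlen : ((List.range matrix.length).map
      (fun j => ((matrix.map (fun r => r[j]!)).sum))).length = matrix.length := by simp
  rw [PySem.List.foldl_pyRange_zero_pyGetD' matrix []
      (fun acc r => acc + PySem.List.pyGetD r x 0) 0]
  rw [PySem.List.foldl_add, PySem.List.pyGetD_eq_getElem _ 0 hx0 (by rw [hlen]; exact_mod_cast hx1)]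
  rw [List.getElem_map, List.getElem_range]
  rw [zero_add]
  apply congrArg
  apply List.map_congr_left
  intro r hr
  have hrl : x < (r.length : Int) := lt_of_lt_of_le hx1 (by exact_mod_cast hpre r hr)
  rw [PySem.List.pyGetD_eq_getElem r 0 hx0 hrl, getElem!_pos r x.toNat (by omega)]

theorem pv_A_canon (matrix : List (List Int)) (hpre : Pre_find_row_and_col matrix) :
    find_row_and_col matrix = pvCanon matrix := by
  unfold find_row_and_col pvCanon
  simp only []
  rw [PySem.List.enumerate_eq_map_pyRange matrix [],
      PySem.List.enumerate_eq_map_pyRange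
        ((List.range matrix.length).map (fun j => ((matrix.map (fun r => r[j]!)).sum))) 0,
      List.foldl_map, List.foldl_map]
  simp only [PySem.List.len_eq, List.length_map, List.length_range]
  have hfold : (PySem.List.pyRange 0 ((matrix.length : Int)) 1).foldl
      (fun (st : Int × Int) x =>
        if (PySem.List.pyRange 0 ((matrix.length : Int)) 1).foldl
            (fun acc y => acc + PySem.List.pyGetD (PySem.List.pyGetD matrix y []) x 0) 0 > st.1
        then ((PySem.List.pyRange 0 ((matrix.length : Int)) 1).foldl
            (fun acc y => acc + PySem.List.pyGetD (PySem.List.pyGetD matrix y []) x 0) 0, x)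
        else st) (0, 0)
    = (PySem.List.pyRange 0 ((matrix.length : Int)) 1).foldl
      (fun (st : Int × Int) j => pvSelStep st
        (j, PySem.List.pyGetD
          ((List.range matrix.length).map (fun j => ((matrix.map (fun r => r[j]!)).sum))) j 0)) (0, 0) := by
    apply PySem.List.foldl_congr_mem
    intro acc x hx
    rw [PySem.List.mem_pyRange_one] at hx
    rw [pv_colsum matrix hpre x hx.1 hx.2]
    rfl
  rw [hfold]
  rfl

theorem pv_B_canon (matrix : List (List Int)) (hpre : Pre_find_row_and_col matrix) :
    find_row_and_col_alt matrix = pvCanon matrix := by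
  unfold find_row_and_col_alt pvCanon
  simp only []
  rw [pv_foldl_prod_split (PySem.List.enumerate matrix)
      (fun (a : Int × Int) (p : Int × List Int) =>
        if ((PySem.List.count p.2 (0 : Int)) : Int) > a.1
        then (((PySem.List.count p.2 (0 : Int)) : Int), p.1) else a)
      (fun c p => (PySem.List.pyRange 0 ((matrix.length : Int)) 1).map
        (fun j => PySem.List.pyGetD c j 0 + PySem.List.pyGetD p.2 j 0))
      (0, 0) (List.replicate matrix.length 0)]
  have hcs : (PySem.List.enumerate matrix).foldl
      (fun c p => (PySem.List.pyRange 0 ((matrix.length : Int)) 1).map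
        (fun j => PySem.List.pyGetD c j 0 + PySem.List.pyGetD p.2 j 0))
      (List.replicate matrix.length 0)
      = (List.range matrix.length).map (fun j => ((matrix.map (fun r => r[j]!)).sum)) := by
    rw [pv_foldl_enumerate_snd matrix 0
        (fun c r => (PySem.List.pyRange 0 ((matrix.length : Int)) 1).map
          (fun j => PySem.List.pyGetD c j 0 + PySem.List.pyGetD r j 0))
        (List.replicate matrix.length 0)]
    rw [pv_zip_fold matrix.length matrix (List.replicate matrix.length 0) (by simp)
        (fun r hr => hpre r hr)]
    apply List.map_congr_left
    intro j hj
    rw [List.mem_range] at hj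
    rw [getElem!_pos (List.replicate matrix.length (0:Int)) j (by simpa using hj),
      List.getElem_replicate, zero_add]
  rw [hcs]
  rfl

theorem find_row_and_col_spec : Claim_equal_find_row_and_col := by
  intro matrix _ hpre
  unfold Spec_find_row_and_col
  rw [pv_A_canon matrix hpre, pv_B_canon matrix hpre]
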